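-- pv_equiv track=rewrite | github.com/hwmaltby/project-euler | problems/problem_57.py | root_two_cont_frac
-- ===== SOURCE A (Python) =====
-- def root_two_cont_frac(n):
--     """Returns a list of all partial fractions of sqrt(2) up to n."""
--     numer, denom = 1, 1
--     fracs = []
--     while n > 0:
--         numer, denom = 2*denom + numer, denom + numer
--         fracs.append((numer, denom))
--         n -= 1
--     return fracs
-- ===== SOURCE B (Python) =====
-- def root_two_cont_frac(n):
--     """Returns a list of all partial fractions of sqrt(2) up to n."""
--     # Stage 1: denominators follow the Pell recurrence d_k = 2*d_{k-1} + d_{k-2}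
--     # with seeds 0, 1 (so the first produced denominator is 2).
--     dens = [0, 1]
--     for _ in range(n):
--         dens.append(2 * dens[-1] + dens[-2])
--     # Stage 2: each numerator is the sum of two consecutive denominators.
--     return [(a + b, b) for a, b in zip(dens[1:], dens[2:])]
-- ===== Notes on version B (the rewrite author's own statement) =====
-- stated objective: alternative
-- what changed: B works in two staged passes: it first builds only the denominator sequence via the Pell recurrence, then derives each numerator as the sum of two consecutive denominators by zipping the list with its shift, instead of A's single loop carrying a coupled (numer, denom) pair transform.
import Mathlib
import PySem

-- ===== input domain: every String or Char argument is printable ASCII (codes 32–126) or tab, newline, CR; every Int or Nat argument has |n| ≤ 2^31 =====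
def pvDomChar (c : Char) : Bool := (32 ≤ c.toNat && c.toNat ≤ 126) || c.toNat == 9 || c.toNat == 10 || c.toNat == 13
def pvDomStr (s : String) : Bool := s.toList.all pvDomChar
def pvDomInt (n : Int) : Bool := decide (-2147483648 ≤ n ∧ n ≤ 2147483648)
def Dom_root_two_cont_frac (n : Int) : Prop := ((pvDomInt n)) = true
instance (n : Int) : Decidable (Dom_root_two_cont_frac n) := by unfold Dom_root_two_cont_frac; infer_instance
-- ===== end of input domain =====

-- B builds only the denominator sequence (Pell recurrence), then derives numerators by zipping consecutive denominators — a staged-pass alternative to A's coupled pair loop; same cost.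
-- ===== PORT A =====
def pvALoop : Nat → Int → Int → List (Int × Int)
  | 0, _, _ => []
  | k + 1, numer, denom =>
      let numer' := 2 * denom + numer
      let denom' := denom + numer
      (numer', denom') :: pvALoop k numer' denom'

def root_two_cont_frac (n : Int) : List (Int × Int) := pvALoop n.toNat 1 1

-- ===== PORT B =====
-- Stage 1 of Source B: the denominators generated by d_k = 2*d_{k-1} + d_{k-2} (seeds 0, 1).
def pvDens : Nat → Int → Int → List Int
  | 0, _, _ => []
  | k + 1, d2, d1 =>
      let d := 2 * d1 + d2
      d :: pvDens k d1 d

-- Stage 2 of Source B: zip the denominator list with its shift and form (a + b, b).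
def root_two_cont_frac_alt (n : Int) : List (Int × Int) :=
  let ds := pvDens n.toNat 0 1
  (List.zip (1 :: ds) ds).map (fun p => (p.1 + p.2, p.2))

-- ===== PRECONDITION & SPEC =====
def Spec_root_two_cont_frac (n : Int) (out : List (Int × Int)) : Prop := out = root_two_cont_frac_alt n
instance (n : Int) (out : List (Int × Int)) : Decidable (Spec_root_two_cont_frac n out) := by unfold Spec_root_two_cont_frac; infer_instance

-- ===== CLAIM (what is proved, stated in full; the proofs are below) =====
def Claim_equal_root_two_cont_frac : Prop := ∀ (n : Int), Dom_root_two_cont_frac n → Spec_root_two_cont_frac n (root_two_cont_frac n)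

-- ===== LEMMAS AND PROOFS =====
-- Invariant: A's numerator equals the current denominator plus the previous one,
-- so A's loop from state (d1 + d2, d1) produces exactly B's zipped pairs.
theorem pvLoop_eq (k : Nat) : ∀ (d2 d1 : Int),
    pvALoop k (d1 + d2) d1 =
      (List.zip (d1 :: pvDens k d2 d1) (pvDens k d2 d1)).map (fun p => (p.1 + p.2, p.2)) := by
  induction k with
  | zero => intro d2 d1; rfl
  | succ k ih =>
      intro d2 d1
      simp only [pvALoop, pvDens, List.zip_cons_cons, List.map_cons]
      have h1 : 2 * d1 + (d1 + d2) = (2 * d1 + d2) + d1 := by ring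
      have h2 : d1 + (d1 + d2) = 2 * d1 + d2 := by ring
      rw [h1, h2]
      rw [ih d1 (2 * d1 + d2), List.cons.injEq, Prod.mk.injEq]
      exact ⟨⟨by ring, rfl⟩, rfl⟩

-- ===== VERDICT (by name: the statement is the Claim_ definition above) =====
theorem root_two_cont_frac_spec : Claim_equal_root_two_cont_frac := by
  intro n _
  show root_two_cont_frac n = root_two_cont_frac_alt n
  unfold root_two_cont_frac root_two_cont_frac_alt
  simpa using pvLoop_eq n.toNat 0 1
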